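-- pv_equiv track=rewrite | github.com/ReneFabricius/project-euler | pr113.py | countNonBouncyBel
-- ===== SOURCE A (Python) =====
-- def countNonBouncyBel(e):
--     D_p = [1]*10
--     I_p = [1]*9
--     s = 0
--     for i in range(e - 1):
--         I = []
--         for j in range(9):
--             I += [sum(I_p[j::])]
--         s += sum(I)
--         I_p = I
--
--         D = []
--         for k in range(10):
--             D += [sum(D_p[k::])]
--         s += sum(D) - 10
--         D_p = D
--
--     return s + 9
-- ===== SOURCE B (Python) =====
-- def _comb(n, k):
--     # binomial coefficient via the multiplicative formula (exact at every step)
--     c = 1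
--     for i in range(1, k + 1):
--         c = c * (n - k + i) // i
--     return c
--
--
-- def countNonBouncyBel(e):
--     # Closed form: non-bouncy numbers below 10^e are C(e+9,9) + C(e+10,10) - 10e - 2.
--     # There are no positive integers below 10^e when e <= 0.
--     if e <= 0:
--         return 0
--     return _comb(e + 9, 9) + _comb(e + 10, 10) - 10 * e - 2
-- ===== Notes on version B (the rewrite author's own statement) =====
-- stated objective: faster
-- what changed: Replaces the O(e) double suffix-sum dynamic-programming loop with a closed-form count: a sum of two binomial coefficients minus a linear term, each binomial computed by the exact multiplicative formula.
-- intended difference: For e = 0 the loop in A never runs and A falls through to its accidental sentinel value of nine (the trailing addition meant to count the one-digit numbers), although no positive integer has at most zero digits; B returns the intended count of zero. — e.g. on countNonBouncyBel(0): A returns 9, B returns 0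
-- outside the precondition, e.g. on countNonBouncyBel(-3): A returns 9, B returns 0
import Mathlib
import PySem

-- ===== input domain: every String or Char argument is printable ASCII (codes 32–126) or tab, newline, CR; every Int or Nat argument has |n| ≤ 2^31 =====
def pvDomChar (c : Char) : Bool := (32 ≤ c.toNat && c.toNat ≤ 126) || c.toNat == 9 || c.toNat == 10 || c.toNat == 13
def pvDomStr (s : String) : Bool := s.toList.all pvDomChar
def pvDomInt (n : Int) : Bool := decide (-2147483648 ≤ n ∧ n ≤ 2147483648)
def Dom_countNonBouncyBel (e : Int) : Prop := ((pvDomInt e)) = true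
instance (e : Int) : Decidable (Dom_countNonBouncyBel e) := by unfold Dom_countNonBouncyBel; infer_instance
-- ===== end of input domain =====

-- B replaces A's O(e) suffix-sum DP loop by the closed-form binomial count
-- comb(e+9,9) + comb(e+10,10) - 10*e - 2 (and returns 0, not A's sentinel 9, for e ≤ 0).

-- ===== PORT A =====

-- one iteration of A's outer loop (the loop variable i is unused by the body)
def pvBodyA (st : List Int × List Int × Int) : List Int × List Int × Int :=
  let D_p := st.1
  let I_p := st.2.1
  let s := st.2.2
  let I := (PySem.List.pyRange 0 9 1).foldl
      (fun I j => I ++ [(PySem.List.slice I_p (some j) none).sum]) []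
  let s := s + I.sum
  let I_p := I
  let D := (PySem.List.pyRange 0 10 1).foldl
      (fun D k => D ++ [(PySem.List.slice D_p (some k) none).sum]) []
  let s := s + D.sum - 10
  let _D_p := D
  (_D_p, I_p, s)

def countNonBouncyBel (e : Int) : Int :=
  let st := (PySem.List.pyRange 0 (e - 1) 1).foldl (fun st _ => pvBodyA st)
      (List.replicate 10 (1 : Int), List.replicate 9 (1 : Int), (0 : Int))
  st.2.2 + 9

-- ===== PORT B =====

-- binomial coefficient by the multiplicative formula (Source B's _comb)
def pvComb (n k : Int) : Int :=
  (PySem.List.pyRange 1 (k + 1) 1).foldl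
    (fun c i => PySem.Int.floordiv (c * (n - k + i)) i) 1

def countNonBouncyBel_alt (e : Int) : Int :=
  if e ≤ 0 then 0
  else pvComb (e + 9) 9 + pvComb (e + 10) 10 - 10 * e - 2

-- ===== PRECONDITION & SPEC =====
-- Pre_ excludes negative e, which lies outside the function's natural domain (e is a
-- number of digits); there A's empty loop falls through to its accidental sentinel of
-- nine while B naturally reports a count of zero.
def Pre_countNonBouncyBel (e : Int) : Prop := 0 ≤ e
instance (e : Int) : Decidable (Pre_countNonBouncyBel e) := by
  unfold Pre_countNonBouncyBel; infer_instance

def pvWitness_countNonBouncyBel : Int := 1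

-- For e = 0 the loop in A never runs and A falls through to its accidental sentinel value
-- of nine (the trailing addition meant to count the one-digit numbers), although no
-- positive integer has at most zero digits; B returns the intended count of zero.
def D_countNonBouncyBel (e : Int) : Prop := e = 0
instance (e : Int) : Decidable (D_countNonBouncyBel e) := by unfold D_countNonBouncyBel; infer_instance

def Spec_countNonBouncyBel (e : Int) (out : Int) : Prop :=
  ¬ D_countNonBouncyBel e → out = countNonBouncyBel_alt e
instance (e : Int) (out : Int) : Decidable (Spec_countNonBouncyBel e out) := by
  unfold Spec_countNonBouncyBel; infer_instance

def pvDiffWitness_countNonBouncyBel : Int := 0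
def pvDiffWitnessOut_countNonBouncyBel : Int × Int := (9, 0)

-- ===== CLAIM (what is proved, stated in full; the proofs are below) =====
def Claim_unchanged_countNonBouncyBel : Prop :=
  ∀ (e : Int), Dom_countNonBouncyBel e → Pre_countNonBouncyBel e →
    Spec_countNonBouncyBel e (countNonBouncyBel e)
def Claim_changed_countNonBouncyBel : Prop :=
  Dom_countNonBouncyBel (pvDiffWitness_countNonBouncyBel) ∧
  Pre_countNonBouncyBel (pvDiffWitness_countNonBouncyBel) ∧
  D_countNonBouncyBel (pvDiffWitness_countNonBouncyBel) ∧
  countNonBouncyBel (pvDiffWitness_countNonBouncyBel) = pvDiffWitnessOut_countNonBouncyBel.1 ∧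
  countNonBouncyBel_alt (pvDiffWitness_countNonBouncyBel) = pvDiffWitnessOut_countNonBouncyBel.2 ∧
  pvDiffWitnessOut_countNonBouncyBel.1 ≠ pvDiffWitnessOut_countNonBouncyBel.2
def Claim_exact_countNonBouncyBel : Prop :=
  ∀ (e : Int), Dom_countNonBouncyBel e → Pre_countNonBouncyBel e → D_countNonBouncyBel e →
    countNonBouncyBel e ≠ countNonBouncyBel_alt e

-- ===== LEMMAS AND PROOFS =====

-- closed forms of A's loop state after i iterations
def pvIvec (i : Nat) : List Int := (List.range 9).map (fun j => ((i + 8 - j).choose i : Int))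
def pvDvec (i : Nat) : List Int := (List.range 10).map (fun k => ((i + 9 - k).choose i : Int))
def pvS : Nat → Int
  | 0 => 0
  | n + 1 => pvS n + ((n + 10).choose (n + 2) : Int) + ((n + 11).choose (n + 2) : Int) - 10

-- reversed hockey-stick identity
theorem pv_hockrev (i m : Nat) :
    ((List.range (m + 1)).map (fun t => (((i + m - t).choose i : Nat) : Int))).sum
      = ((i + m + 1).choose (i + 1) : Int) := by
  induction m with
  | zero => simp
  | succ m ih =>
    rw [List.range_succ_eq_map]
    simp only [List.map_cons, List.map_map, List.sum_cons, Function.comp_def,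
      Nat.succ_eq_add_one]
    have h2 : ((List.range (m + 1)).map
        (fun t => (((i + (m + 1) - (t + 1)).choose i : Nat) : Int))).sum
        = ((i + m + 1).choose (i + 1) : Int) := by
      rw [List.map_congr_left (fun t _ => by rw [show i + (m + 1) - (t + 1) = i + m - t from by omega])]
      exact ih
    rw [h2, show i + (m + 1) - 0 = i + m + 1 from by omega,
      show i + (m + 1) + 1 = i + m + 2 from by omega,
      Nat.choose_succ_succ' (i + m + 1) i]
    push_cast
    ring

-- the inner loop builds the list of suffix sums
theorem pv_inner_fold (xs : List Int) (n : Nat) :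
    (PySem.List.pyRange 0 (n : Int) 1).foldl
        (fun I j => I ++ [(PySem.List.slice xs (some j) none).sum]) []
      = (List.range n).map (fun j => (xs.drop j).sum) := by
  induction n with
  | zero => simp [PySem.List.pyRange_one_eq_nil]
  | succ n ih =>
    have hc : ((n + 1 : Nat) : Int) = (n : Int) + 1 := by push_cast; ring
    rw [hc, PySem.List.pyRange_one_succ_right (by omega), List.foldl_append, ih,
      List.range_succ, List.map_append]
    simp [PySem.List.slice_from_natCast]

theorem pv_drop_map_range (g : Nat → Int) (n j : Nat) (h : j ≤ n) :
    ((List.range n).map g).drop j = (List.range (n - j)).map (fun t => g (j + t)) := by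
  have hn : n = j + (n - j) := by omega
  rw [hn, List.range_add, List.map_append, List.map_map,
    List.drop_append_of_le_length (by simp)]
  simp [Function.comp_def]

theorem pv_Ivec_drop_sum (i j : Nat) (h : j ≤ 8) :
    ((pvIvec i).drop j).sum = ((i + 9 - j).choose (i + 1) : Int) := by
  unfold pvIvec
  rw [pv_drop_map_range _ 9 j (by omega)]
  have h1 : ∀ t ∈ List.range (9 - j), i + 8 - (j + t) = i + (8 - j) - t := by
    intro t ht; rw [List.mem_range] at ht; omega
  have h2 : 9 - j = (8 - j) + 1 := by omega
  rw [List.map_congr_left (fun t ht => by rw [h1 t ht]), h2, pv_hockrev i (8 - j)]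
  have : i + (8 - j) + 1 = i + 9 - j := by omega
  rw [this]

theorem pv_Dvec_drop_sum (i k : Nat) (h : k ≤ 9) :
    ((pvDvec i).drop k).sum = ((i + 10 - k).choose (i + 1) : Int) := by
  unfold pvDvec
  rw [pv_drop_map_range _ 10 k (by omega)]
  have h1 : ∀ t ∈ List.range (10 - k), i + 9 - (k + t) = i + (9 - k) - t := by
    intro t ht; rw [List.mem_range] at ht; omega
  have h2 : 10 - k = (9 - k) + 1 := by omega
  rw [List.map_congr_left (fun t ht => by rw [h1 t ht]), h2, pv_hockrev i (9 - k)]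
  have : i + (9 - k) + 1 = i + 10 - k := by omega
  rw [this]

theorem pv_body_step (i : Nat) (s : Int) :
    pvBodyA (pvDvec i, pvIvec i, s)
      = (pvDvec (i + 1), pvIvec (i + 1),
         s + ((i + 10).choose (i + 2) : Int) + ((i + 11).choose (i + 2) : Int) - 10) := by
  have hI : (List.range 9).map (fun j => ((pvIvec i).drop j).sum) = pvIvec (i + 1) := by
    conv_rhs => rw [pvIvec]
    refine List.map_congr_left ?_
    intro j hj
    rw [List.mem_range] at hj
    rw [pv_Ivec_drop_sum i j (by omega), show i + 1 + 8 - j = i + 9 - j from by omega]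
  have hD : (List.range 10).map (fun k => ((pvDvec i).drop k).sum) = pvDvec (i + 1) := by
    conv_rhs => rw [pvDvec]
    refine List.map_congr_left ?_
    intro k hk
    rw [List.mem_range] at hk
    rw [pv_Dvec_drop_sum i k (by omega), show i + 1 + 9 - k = i + 10 - k from by omega]
  have hIs : (pvIvec (i + 1)).sum = ((i + 10).choose (i + 2) : Int) := by
    have h := pv_Ivec_drop_sum (i + 1) 0 (by omega)
    simpa [show i + 1 + 9 - 0 = i + 10 from by omega] using h
  have hDs : (pvDvec (i + 1)).sum = ((i + 11).choose (i + 2) : Int) := by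
    have h := pv_Dvec_drop_sum (i + 1) 0 (by omega)
    simpa [show i + 1 + 10 - 0 = i + 11 from by omega] using h
  simp only [pvBodyA]
  rw [show (9 : Int) = ((9 : Nat) : Int) from by norm_num,
    show (10 : Int) = ((10 : Nat) : Int) from by norm_num,
    pv_inner_fold (pvIvec i) 9, pv_inner_fold (pvDvec i) 10, hI, hD, hIs, hDs]

theorem pv_loopA (n : Nat) :
    (PySem.List.pyRange 0 (n : Int) 1).foldl (fun st _ => pvBodyA st)
        (List.replicate 10 (1 : Int), List.replicate 9 (1 : Int), (0 : Int))
      = (pvDvec n, pvIvec n, pvS n) := by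
  induction n with
  | zero =>
    simp only [Nat.cast_zero]
    rw [PySem.List.pyRange_one_eq_nil le_rfl]
    decide
  | succ n ih =>
    have hc : ((n + 1 : Nat) : Int) = (n : Int) + 1 := by push_cast; ring
    rw [hc, PySem.List.pyRange_one_succ_right (by omega), List.foldl_append, ih]
    simp only [List.foldl_cons, List.foldl_nil]
    rw [pv_body_step]
    simp [pvS]

theorem pv_S_closed (n : Nat) :
    pvS n = ((n + 10).choose 9 : Int) + ((n + 11).choose 10 : Int) - 10 * n - 21 := by
  induction n with
  | zero => decide
  | succ n ih =>
    rw [pvS, ih]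
    have hs1 : (n + 10).choose (n + 2) = (n + 10).choose 8 := by
      have := Nat.choose_symm (n := n + 10) (k := 8) (by omega)
      simpa [show n + 10 - 8 = n + 2 by omega] using this
    have hs2 : (n + 11).choose (n + 2) = (n + 11).choose 9 := by
      have := Nat.choose_symm (n := n + 11) (k := 9) (by omega)
      simpa [show n + 11 - 9 = n + 2 by omega] using this
    have hp1 : (n + 11).choose 9 = (n + 10).choose 8 + (n + 10).choose 9 :=
      Nat.choose_succ_succ' (n + 10) 8
    have hp2 : (n + 12).choose 10 = (n + 11).choose 9 + (n + 11).choose 10 :=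
      Nat.choose_succ_succ' (n + 11) 9
    have e1 : n + 1 + 10 = n + 11 := by omega
    have e2 : n + 1 + 11 = n + 12 := by omega
    rw [hs1, hs2, e1, e2, hp2, hp1]
    push_cast
    ring

theorem pv_comb_partial (n k : Nat) (h : k ≤ n) :
    ∀ j, j ≤ k →
      (PySem.List.pyRange 1 ((j : Int) + 1) 1).foldl
          (fun c i => PySem.Int.floordiv (c * ((n : Int) - (k : Int) + i)) i) 1
        = ((n - k + j).choose j : Int) := by
  intro j
  induction j with
  | zero => intro _; simp [PySem.List.pyRange_one_eq_nil]
  | succ j ih =>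
    intro hj
    have hc : ((j + 1 : Nat) : Int) + 1 = ((j : Int) + 1) + 1 := by push_cast; ring
    rw [hc, PySem.List.pyRange_one_succ_right (by omega), List.foldl_append,
      ih (by omega)]
    simp only [List.foldl_cons, List.foldl_nil]
    have harg : (n : Int) - (k : Int) + ((j : Int) + 1) = ((n - k + j + 1 : Nat) : Int) := by
      push_cast [Nat.cast_sub (by omega : k ≤ n)]; ring
    have hmul : ((n - k + j).choose j : Int) * ((n - k + j + 1 : Nat) : Int)
        = ((n - k + j + 1).choose (j + 1) : Int) * ((j : Int) + 1) := by
      have := Nat.add_one_mul_choose_eq (n - k + j) j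
      -- add_one_mul_choose_eq : (n+1) * n.choose k = (n+1).choose (k+1) * (k+1)
      push_cast
      push_cast at this
      linarith [this]
    rw [harg, hmul, PySem.Int.floordiv_eq_ediv_of_pos (by omega),
      Int.mul_ediv_cancel _ (by omega : (j : Int) + 1 ≠ 0),
      show n - k + j + 1 = n - k + (j + 1) from by omega]

theorem pv_comb_eq (n k : Nat) (h : k ≤ n) :
    pvComb (n : Int) (k : Int) = (n.choose k : Int) := by
  unfold pvComb
  have := pv_comb_partial n k h k le_rfl
  rw [show n - k + k = n from by omega] at this
  exact this

-- ===== VERDICT (by name: the statement is the Claim_ definition above) =====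
theorem countNonBouncyBel_spec : Claim_unchanged_countNonBouncyBel := by
  intro e _ hPre hD
  unfold Pre_countNonBouncyBel at hPre
  unfold D_countNonBouncyBel at hD
  have he : 1 ≤ e := by omega
  set n : Nat := (e - 1).toNat with hn
  have hen : e = (n : Int) + 1 := by omega
  unfold countNonBouncyBel countNonBouncyBel_alt
  rw [if_neg (by omega)]
  have h1 : e - 1 = (n : Int) := by omega
  rw [h1, pv_loopA]
  have h9 : e + 9 = ((n + 10 : Nat) : Int) := by push_cast; omega
  have h10 : e + 10 = ((n + 11 : Nat) : Int) := by push_cast; omega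
  rw [h9, h10,
    (by norm_num : (9 : Int) = ((9 : Nat) : Int)),
    (by norm_num : (10 : Int) = ((10 : Nat) : Int)),
    pv_comb_eq (n + 10) 9 (by omega), pv_comb_eq (n + 11) 10 (by omega)]
  simp only []
  rw [pv_S_closed, hen]
  push_cast
  ring

theorem countNonBouncyBel_changed : Claim_changed_countNonBouncyBel := by
  unfold Claim_changed_countNonBouncyBel; decide

theorem countNonBouncyBel_tight : Claim_exact_countNonBouncyBel := by
  intro e _ _ hD
  unfold D_countNonBouncyBel at hD
  subst hD
  decide
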